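-- pv_equiv track=rewrite | github.com/personalcomputer/tableconv | adapters/df/ascii.py | render_asciibox
-- ===== SOURCE A (Python) =====
-- def _render_value(value):
--     if value is None:
--         return ''
--     return str(value).replace('\n', '\\n')
--
-- def _get_serialized_rows(rows):
--     return [{key: _render_value(value) for key, value in row.items()} for row in rows]
--
-- def _get_column_max_lengths(rows, column_names):
--     return {column: max([len(row[column]) for row in rows] + [len(column)]) for column in column_names}
--
-- def render_asciibox(ordered_fields, rows):
--     """ Text table rendering inspired by SQLLine or pgcli. """
--     serialized_rows = _get_serialized_rows(rows)
--     max_lengths = _get_column_max_lengths(serialized_rows, ordered_fields)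
--
--     output_lines = []
--     output_lines.append('+-' + '-+-'.join(['-'*max_lengths[field] for field in ordered_fields]) + '-+')
--     output_lines.append('| ' + ' | '.join([field.center(max_lengths[field]) for field in ordered_fields]) + ' |')
--     output_lines.append('|-' + '-+-'.join(['-'*max_lengths[field] for field in ordered_fields]) + '-|')
--     for row in serialized_rows:
--         rendered_values_list = []
--         for field in ordered_fields:
--             rendered_values_list.append(row[field].ljust(max_lengths[field]))
--         output_lines.append('| ' + ' | '.join(rendered_values_list) + ' |')
--     output_lines.append('+-' + '-+-'.join(['-'*max_lengths[field] for field in ordered_fields]) + '-+')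
--     return '\n'.join(output_lines)
-- ===== SOURCE B (Python) =====
-- def _column_width(field, cells):
--     width = len(field)
--     for c in cells:
--         width = max(width, len(c))
--     return width
--
--
-- def render_asciibox(ordered_fields, rows):
--     """ Text table rendering inspired by SQLLine or pgcli. (column-major build) """
--     def ser(value):
--         return '' if value is None else str(value).replace('\n', '\\n')
--
--     columns = []
--     for field in ordered_fields:
--         cells = [ser(row[field]) for row in rows]
--         width = _column_width(field, cells)
--         columns.append(('-' * width,
--                         field.center(width),
--                         [c.ljust(width) for c in cells]))
--
--     border = '+-' + '-+-'.join(col[0] for col in columns) + '-+'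
--     header = '| ' + ' | '.join(col[1] for col in columns) + ' |'
--     divider = '|-' + '-+-'.join(col[0] for col in columns) + '-|'
--     body = ['| ' + ' | '.join(col[2][i] for col in columns) + ' |'
--             for i in range(len(rows))]
--     return '\n'.join([border, header, divider] + body + [border])
-- ===== Notes on version B (the rewrite author's own statement) =====
-- stated objective: alternative
-- what changed: B builds the table column-major (per field: width, dashes, centered header, padded cells) and assembles output lines by row index, instead of A's per-row serialized dicts, a column-length dict and row-major rendering passes.
import Mathlib
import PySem

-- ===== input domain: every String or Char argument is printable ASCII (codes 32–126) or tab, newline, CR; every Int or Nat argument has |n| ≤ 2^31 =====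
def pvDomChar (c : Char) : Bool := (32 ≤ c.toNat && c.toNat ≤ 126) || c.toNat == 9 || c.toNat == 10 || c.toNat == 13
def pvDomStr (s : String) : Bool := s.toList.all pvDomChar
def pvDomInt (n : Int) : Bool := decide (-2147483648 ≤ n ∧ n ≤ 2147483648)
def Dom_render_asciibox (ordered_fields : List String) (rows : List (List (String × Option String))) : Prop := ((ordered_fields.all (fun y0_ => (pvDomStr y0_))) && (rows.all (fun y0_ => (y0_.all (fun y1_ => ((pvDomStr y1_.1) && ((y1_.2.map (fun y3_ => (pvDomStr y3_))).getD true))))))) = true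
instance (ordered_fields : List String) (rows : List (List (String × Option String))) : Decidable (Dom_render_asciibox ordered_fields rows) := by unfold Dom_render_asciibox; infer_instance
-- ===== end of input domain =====

-- B builds the table column-major (width, header cell, padded cells per field) and assembles
-- lines by index, instead of A's row-major passes over per-row dicts; objective: alternative.


-- Shared helpers: exact ports of the Python builtins/str-ops both sources use.
-- _render_value: None -> '', else the string with '\n' replaced by '\\n'.
def pvSer (v : Option String) : String :=
  match v with
  | none => ""
  | some s => PySem.Str.replace s "\n" "\\n"

-- '-' * w  (negative w gives the empty string, as in Python)
def pvDashes (w : Int) : String := String.ofList (List.replicate w.toNat '-')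

-- s.ljust(w): pad with spaces on the right (no-op when w <= len(s))
def pvLjust (s : String) (w : Int) : String :=
  String.ofList (s.toList ++ List.replicate (w - (s.toList.length : Int)).toNat ' ')

-- s.center(w): CPython rule — left margin = marg//2 + (marg & w & 1)
def pvCenter (s : String) (w : Int) : String :=
  let n : Int := (s.toList.length : Int)
  if w ≤ n then s
  else
    let marg := w - n
    let left := PySem.Int.floordiv marg 2 + PySem.Int.band (PySem.Int.band marg w) 1
    String.ofList (List.replicate left.toNat ' ' ++ s.toList ++ List.replicate (marg - left).toNat ' ')

-- ===== PORT A =====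
-- rows are Python dicts (assoc lists); they are read through PySem.Dict.ofList.
-- _get_serialized_rows: [{key: _render_value(value) for key, value in row.items()} for row in rows]
def pvGetSerializedRows (rows : List (List (String × Option String))) : List (PySem.Dict String String) :=
  rows.map (fun row => PySem.Dict.ofList (row.map (fun kv => (kv.1, pvSer kv.2))))

-- _get_column_max_lengths: {column: max([len(row[column]) for row in rows] + [len(column)]) for column in column_names};
-- the argument of max is nonempty, so max? is some and the .getD 0 default is unreachable;
-- row[column] uses Dict.getD with placeholder "" (KeyError inputs are excluded by Pre_)
def pvGetColumnMaxLengths (rows : List (PySem.Dict String String)) (column_names : List String) : PySem.Dict String Int :=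
  PySem.Dict.ofList (column_names.map (fun column =>
    (column, (PySem.List.max? ((rows.map (fun row => PySem.Str.len (row.getD column ""))) ++ [PySem.Str.len column]) (fun y => y)).getD 0)))

def render_asciibox (ordered_fields : List String) (rows : List (List (String × Option String))) : String :=
  let serialized_rows := pvGetSerializedRows rows
  let max_lengths := pvGetColumnMaxLengths serialized_rows ordered_fields
  let out0 : List String :=
    [ "+-" ++ PySem.Str.join "-+-" (ordered_fields.map (fun field => pvDashes (max_lengths.getD field 0))) ++ "-+",
      "| " ++ PySem.Str.join " | " (ordered_fields.map (fun field => pvCenter field (max_lengths.getD field 0))) ++ " |",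
      "|-" ++ PySem.Str.join "-+-" (ordered_fields.map (fun field => pvDashes (max_lengths.getD field 0))) ++ "-|" ]
  let out1 : List String :=
    serialized_rows.foldl (fun acc row =>
      acc ++ [ "| " ++ PySem.Str.join " | "
                 (ordered_fields.foldl (fun rvl field => rvl ++ [pvLjust (row.getD field "") (max_lengths.getD field 0)]) [])
               ++ " |" ]) out0
  let out2 : List String :=
    out1 ++ [ "+-" ++ PySem.Str.join "-+-" (ordered_fields.map (fun field => pvDashes (max_lengths.getD field 0))) ++ "-+" ]
  PySem.Str.join "\n" out2

-- the per-row, per-field cell: ser(row[field]); KeyError (missing key) is excluded by Pre_,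
-- "" is the placeholder on that unreachable branch
def pvCell (field : String) (row : List (String × Option String)) : String :=
  match (PySem.Dict.ofList row).get? field with
  | none => ""
  | some v => pvSer v

-- _column_width: width = max(len(field), max over the rendered cells)
def pvWidth (field : String) (cells : List String) : Int :=
  cells.foldl (fun w c => max w (PySem.Str.len c)) (PySem.Str.len field)

-- ===== PORT B =====
-- column-major: per field (dashes, centered header, padded cells); lines joined by index.
-- row[field] (KeyError when missing, excluded by Pre_) -> "" placeholder on the none branch.
def render_asciibox_alt (ordered_fields : List String) (rows : List (List (String × Option String))) : String :=
  let columns : List (String × String × List String) :=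
    ordered_fields.map (fun field =>
      let cells : List String := rows.map (fun row => pvCell field row)
      let width : Int := pvWidth field cells
      (pvDashes width, pvCenter field width, cells.map (fun c => pvLjust c width)))
  let border := "+-" ++ PySem.Str.join "-+-" (columns.map (fun col => col.1)) ++ "-+"
  let header := "| " ++ PySem.Str.join " | " (columns.map (fun col => col.2.1)) ++ " |"
  let divider := "|-" ++ PySem.Str.join "-+-" (columns.map (fun col => col.1)) ++ "-|"
  -- col[2][i]: i < len(rows) = len(col[2]), so the .getD default is unreachable
  let body : List String :=
    (List.range rows.length).map (fun i =>
      "| " ++ PySem.Str.join " | " (columns.map (fun col => col.2.2.getD i "")) ++ " |")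
  PySem.Str.join "\n" ([border, header, divider] ++ body ++ [border])

-- ===== PRECONDITION & SPEC =====
-- Python A raises KeyError (row[field]) when some ordered field is missing from some row;
-- Pre_ admits exactly the inputs where every ordered field occurs among every row's keys.
def Pre_render_asciibox (ordered_fields : List String) (rows : List (List (String × Option String))) : Prop :=
  ∀ row ∈ rows, ∀ field ∈ ordered_fields, field ∈ row.map (fun kv => kv.1)
instance (ordered_fields : List String) (rows : List (List (String × Option String))) : Decidable (Pre_render_asciibox ordered_fields rows) := by unfold Pre_render_asciibox; infer_instance

def pvWitness_render_asciibox : List String × (List (List (String × Option String))) :=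
  (["id", "name"], [[("id", some "1"), ("name", some "ada")], [("id", some "2"), ("name", none)]])

def Spec_render_asciibox (ordered_fields : List String) (rows : List (List (String × Option String))) (out : String) : Prop := out = render_asciibox_alt ordered_fields rows
instance (ordered_fields : List String) (rows : List (List (String × Option String))) (out : String) : Decidable (Spec_render_asciibox ordered_fields rows out) := by unfold Spec_render_asciibox; infer_instance

-- ===== CLAIM (what is proved, stated in full; the proofs are below) =====
def Claim_equal_render_asciibox : Prop := ∀ (ordered_fields : List String) (rows : List (List (String × Option String))), Dom_render_asciibox ordered_fields rows → Pre_render_asciibox ordered_fields rows → Spec_render_asciibox ordered_fields rows (render_asciibox ordered_fields rows)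

-- ===== LEMMAS AND PROOFS =====

lemma pv_serialize_update (l : List (String × Option String))
    (d : PySem.Dict String String) (d' : PySem.Dict String (Option String))
    (h : ∀ k, d.get? k = (d'.get? k).map pvSer) (k : String) :
    (d.update (l.map (fun kv => (kv.1, pvSer kv.2)))).get? k = ((d'.update l).get? k).map pvSer := by
  induction l generalizing d d' with
  | nil => exact h k
  | cons kv rest ih =>
      simp only [List.map_cons, PySem.Dict.update, List.foldl_cons]
      refine ih (d.insert kv.1 (pvSer kv.2)) (d'.insert kv.1 kv.2) (fun j => ?_)
      rw [PySem.Dict.get?_insert, PySem.Dict.get?_insert]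
      split
      · rfl
      · exact h j

lemma pv_serialize_get? (l : List (String × Option String)) (k : String) :
    (PySem.Dict.ofList (l.map (fun kv => (kv.1, pvSer kv.2)))).get? k
      = ((PySem.Dict.ofList l).get? k).map pvSer := by
  exact pv_serialize_update l PySem.Dict.empty PySem.Dict.empty
    (fun j => by rw [PySem.Dict.get?_empty]; rfl) k

lemma pv_widthdict_get? (l : List String) (g : String → Int) (d : PySem.Dict String Int) (k : String) :
    (d.update (l.map (fun c => (c, g c)))).get? k = if k ∈ l then some (g k) else d.get? k := by
  induction l generalizing d with
  | nil => simp [PySem.Dict.update]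
  | cons c rest ih =>
      simp only [List.map_cons, PySem.Dict.update, List.foldl_cons] at *
      rw [ih (d.insert c (g c))]
      by_cases hr : k ∈ rest
      · simp [hr]
      · rw [PySem.Dict.get?_insert]
        by_cases hc : k = c
        · subst hc; simp [hr]
        · simp [hr, hc, List.mem_cons]

lemma pv_foldl_max_pull (t : List Int) (a b : Int) :
    t.foldl max (max b a) = max (t.foldl max b) a := by
  induction t generalizing b with
  | nil => rfl
  | cons c t ih => simpa [max_right_comm b a c] using ih (max b c)

lemma pv_max?_append_singleton (L : List Int) (a : Int) :
    (PySem.List.max? (L ++ [a]) (fun y => y)).getD 0 = L.foldl max a := by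
  cases L with
  | nil => simp [PySem.List.max?_id_cons]
  | cons x t =>
      rw [List.cons_append, PySem.List.max?_id_cons, Option.getD_some, List.foldl_append]
      simp only [List.foldl_cons, List.foldl_nil]
      rw [← pv_foldl_max_pull t a x, max_comm a x]

lemma pv_range_map_eq_map {α β : Type} (l : List α) (F : Nat → β) (G : α → β)
    (h : ∀ (i : Nat) (hi : i < l.length), F i = G l[i]) :
    (List.range l.length).map F = l.map G := by
  apply List.ext_getElem (by simp)
  intro i h1 h2
  simp only [List.getElem_map, List.getElem_range]
  exact h i (by simpa using h2)

-- ===== VERDICT (by name: the statement is the Claim_ definition above) =====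
-- cell equality: A's serialized-dict lookup is B's pvCell
lemma pv_cellA (row : List (String × Option String)) (f : String) :
    (PySem.Dict.ofList (row.map (fun kv => (kv.1, pvSer kv.2)))).getD f "" = pvCell f row := by
  rw [PySem.Dict.getD, pv_serialize_get?]
  cases h : (PySem.Dict.ofList row).get? f <;> simp [pvCell, h]

-- A's max_lengths dict agrees with pvW on every ordered field
lemma pv_widthA (rows : List (List (String × Option String))) (fields : List String)
    (f : String) (hf : f ∈ fields) :
    (pvGetColumnMaxLengths (pvGetSerializedRows rows) fields).getD f 0 = pvWidth f (rows.map (fun row => pvCell f row)) := by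
  rw [PySem.Dict.getD, pvGetColumnMaxLengths, PySem.Dict.ofList, pv_widthdict_get?, if_pos hf]
  rw [Option.getD_some]
  have hlist : ((pvGetSerializedRows rows).map (fun row => PySem.Str.len (row.getD f "")))
      = (rows.map (fun row => pvCell f row)).map PySem.Str.len := by
    rw [pvGetSerializedRows, List.map_map, List.map_map]
    exact List.map_congr_left (fun row _ => by
      show PySem.Str.len ((PySem.Dict.ofList (row.map (fun kv => (kv.1, pvSer kv.2)))).getD f "") = _
      rw [pv_cellA]; rfl)
  rw [hlist, pv_max?_append_singleton, List.foldl_map]; rfl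

theorem render_asciibox_spec : Claim_equal_render_asciibox := by
  intro fields rows _hdom _hpre
  unfold Spec_render_asciibox render_asciibox render_asciibox_alt
  simp only [PySem.List.foldl_append_singleton_eq_map, List.nil_append]
  have hda : fields.map (fun field => pvDashes ((pvGetColumnMaxLengths (pvGetSerializedRows rows) fields).getD field 0))
      = (fields.map (fun field =>
          (pvDashes (pvWidth field (rows.map (fun row => pvCell field row))), pvCenter field (pvWidth field (rows.map (fun row => pvCell field row))),
            (rows.map (fun row => pvCell field row)).map (fun c => pvLjust c (pvWidth field (rows.map (fun row => pvCell field row))))))).map (fun col => col.1) := by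
    rw [List.map_map]
    refine List.map_congr_left (fun f hf => ?_)
    show pvDashes ((pvGetColumnMaxLengths (pvGetSerializedRows rows) fields).getD f 0) = pvDashes (pvWidth f (rows.map (fun row => pvCell f row)))
    rw [pv_widthA rows fields f hf]
  have hce : fields.map (fun field => pvCenter field ((pvGetColumnMaxLengths (pvGetSerializedRows rows) fields).getD field 0))
      = (fields.map (fun field =>
          (pvDashes (pvWidth field (List.map (fun row => pvCell field row) rows)), pvCenter field (pvWidth field (List.map (fun row => pvCell field row) rows)),
            (rows.map (fun row => pvCell field row)).map (fun c => pvLjust c (pvWidth field (List.map (fun row => pvCell field row) rows)))))).map (fun col => col.2.1) := by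
    rw [List.map_map]
    refine List.map_congr_left (fun f hf => ?_)
    show pvCenter f ((pvGetColumnMaxLengths (pvGetSerializedRows rows) fields).getD f 0) = pvCenter f (pvWidth f (rows.map (fun row => pvCell f row)))
    rw [pv_widthA rows fields f hf]
  have hbody : (pvGetSerializedRows rows).map (fun x => "| " ++ PySem.Str.join " | " (fields.map (fun x_1 => pvLjust (x.getD x_1 "") ((pvGetColumnMaxLengths (pvGetSerializedRows rows) fields).getD x_1 0))) ++ " |")
      = (List.range rows.length).map (fun i => "| " ++ PySem.Str.join " | "
          (((fields.map (fun field =>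
              (pvDashes (pvWidth field (List.map (fun row => pvCell field row) rows)), pvCenter field (pvWidth field (List.map (fun row => pvCell field row) rows)),
                (rows.map (fun row => pvCell field row)).map (fun c => pvLjust c (pvWidth field (List.map (fun row => pvCell field row) rows))))))).map (fun col => col.2.2.getD i "")) ++ " |") := by
    rw [pvGetSerializedRows, List.map_map]
    refine Eq.symm (pv_range_map_eq_map rows _ _ (fun i hi => ?_))
    have hinner : ((fields.map (fun field =>
          (pvDashes (pvWidth field (List.map (fun row => pvCell field row) rows)), pvCenter field (pvWidth field (List.map (fun row => pvCell field row) rows)),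
            (rows.map (fun row => pvCell field row)).map (fun c => pvLjust c (pvWidth field (List.map (fun row => pvCell field row) rows)))))).map (fun col => col.2.2.getD i ""))
        = fields.map (fun f => pvLjust ((PySem.Dict.ofList (rows[i].map (fun kv => (kv.1, pvSer kv.2)))).getD f "") ((pvGetColumnMaxLengths (pvGetSerializedRows rows) fields).getD f 0)) := by
      rw [List.map_map]
      refine List.map_congr_left (fun f hf => ?_)
      rw [pv_cellA, pv_widthA rows fields f hf]
      show ((rows.map (fun row => pvCell f row)).map (fun c => pvLjust c (pvWidth f (rows.map (fun row => pvCell f row))))).getD i ""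
        = pvLjust (pvCell f rows[i]) (pvWidth f (rows.map (fun row => pvCell f row)))
      rw [List.getD_eq_getElem?_getD, List.getElem?_map, List.getElem?_map, List.getElem?_eq_getElem hi]
      rfl
    rw [hinner]
    rfl
  rw [hda, hce, hbody]
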